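-- pv_equiv track=rewrite | github.com/ephrem-ketachew/data-structure-and-algorithms | max-subsequence---weekly-contest.py | numOfSubsequences
-- ===== SOURCE A (Python) =====
-- def numOfSubsequences(s: str) -> int:
--     n = len(s)
--
--     count_l = count_lc = count_lct = 0
--     prefix_l = [0] * n
--
--     for i, ch in enumerate(s):
--         if ch == 'L':
--             count_l += 1
--         elif ch == 'C':
--             count_lc += count_l
--         elif ch == 'T':
--             count_lct += count_lc
--
--         prefix_l[i] = count_l
--
--     count_t = count_ct = 0
--     max_gain_c = 0
--     for i in range(n - 1, -1, -1):
--         ch = s[i]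
--         if ch == 'T':
--             count_t += 1
--         elif ch == 'C':
--             count_ct += count_t
--
--         max_gain_c = max(max_gain_c, prefix_l[i] * count_t)
--
--     max_gain_t = count_lc
--     max_gain_l = count_ct
--
--     return count_lct + max(max_gain_l, max_gain_c, max_gain_t)
-- ===== SOURCE B (Python) =====
-- def numOfSubsequences(s: str) -> int:
--     total_t = s.count('T')
--
--     count_l = count_c = count_lc = count_lct = count_ct = 0
--     t_seen = 0
--     max_gain_c = 0
--
--     for ch in s:
--         if ch == 'L':
--             count_l += 1
--             gain = count_l * (total_t - t_seen)
--             if gain > max_gain_c: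
--                 max_gain_c = gain
--         elif ch == 'C':
--             count_lc += count_l
--             count_c += 1
--         elif ch == 'T':
--             count_lct += count_lc
--             count_ct += count_c
--             t_seen += 1
--
--     return count_lct + max(count_ct, max_gain_c, count_lc)
-- ===== Notes on version B (the rewrite author's own statement) =====
-- stated objective: faster
-- what changed: B replaces A's prefix array and second backward index loop with a single forward pass that precomputes the total T-count and tracks the C-insertion gain only at L positions as count_l * (total_t - t_seen).
import Mathlib
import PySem

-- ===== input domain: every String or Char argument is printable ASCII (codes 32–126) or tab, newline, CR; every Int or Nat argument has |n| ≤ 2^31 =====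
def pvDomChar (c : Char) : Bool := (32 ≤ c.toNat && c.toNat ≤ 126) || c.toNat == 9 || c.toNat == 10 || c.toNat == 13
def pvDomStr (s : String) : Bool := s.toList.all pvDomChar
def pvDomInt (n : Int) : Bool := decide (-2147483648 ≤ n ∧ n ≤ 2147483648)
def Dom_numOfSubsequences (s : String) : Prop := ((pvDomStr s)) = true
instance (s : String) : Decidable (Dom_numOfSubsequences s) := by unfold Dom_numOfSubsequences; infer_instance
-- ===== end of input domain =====

-- B: one forward pass, no prefix_l array and no backward loop; gain tracked at L positions only (measured faster, O(1) extra space).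

-- ===== PORT A =====
-- first loop: state (count_l, count_lc, count_lct, prefix_l); prefix_l[i] = count_l is a
-- write-once-in-order assignment into [0]*n, ported as appending count_l each iteration
def aLoop1 : List Char → Int → Int → Int → List Int → Int × Int × Int × List Int
  | [], l, lc, lct, pre => (l, lc, lct, pre)
  | c :: r, l, lc, lct, pre =>
    if c = 'L' then aLoop1 r (l + 1) lc lct (pre ++ [l + 1])
    else if c = 'C' then aLoop1 r l (lc + l) lct (pre ++ [l])
    else if c = 'T' then aLoop1 r l lc (lct + lc) (pre ++ [l])
    else aLoop1 r l lc lct (pre ++ [l])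

-- second loop 'for i in range(n-1,-1,-1)' reads s[i] and prefix_l[i], all indices in range:
-- ported as a fold over the reversed zip of s with prefix_l (same pairs, same order);
-- state (count_t, count_ct, max_gain_c), branch order and update order as in the Python
def aLoop2 : List (Char × Int) → Int → Int → Int → Int × Int × Int
  | [], t, ct, mg => (t, ct, mg)
  | (c, p) :: r, t, ct, mg =>
    let t' := if c = 'T' then t + 1 else t
    let ct' := if c = 'T' then ct else if c = 'C' then ct + t else ct
    aLoop2 r t' ct' (max mg (p * t'))

def numOfSubsequences (s : String) : Int :=
  let xs := s.toList
  let r1 := aLoop1 xs 0 0 0 []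
  let r2 := aLoop2 ((xs.zip r1.2.2.2).reverse) 0 0 0
  -- max_gain_t = count_lc; max_gain_l = count_ct; return count_lct + max(l, c, t gains)
  r1.2.2.1 + max (max r2.2.1 r2.2.2) r1.2.1

-- ===== PORT B =====
-- single forward pass; state (count_l, count_c, count_lc, count_lct, count_ct, t_seen, max_gain_c)
def bLoop (tt : Int) : List Char → Int → Int → Int → Int → Int → Int → Int →
    Int × Int × Int × Int × Int × Int × Int
  | [], l, c, lc, lct, ct, ts, mg => (l, c, lc, lct, ct, ts, mg)
  | ch :: r, l, c, lc, lct, ct, ts, mg =>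
    if ch = 'L' then
      let gain := (l + 1) * (tt - ts)
      bLoop tt r (l + 1) c lc lct ct ts (if gain > mg then gain else mg)
    else if ch = 'C' then bLoop tt r l (c + 1) (lc + l) lct ct ts mg
    else if ch = 'T' then bLoop tt r l c lc (lct + lc) (ct + c) (ts + 1) mg
    else bLoop tt r l c lc lct ct ts mg

def numOfSubsequences_alt (s : String) : Int :=
  let totalT : Int := PySem.Str.count s "T"
  let st := bLoop totalT s.toList 0 0 0 0 0 0 0
  -- return count_lct + max(count_ct, max_gain_c, count_lc)
  st.2.2.2.1 + max (max st.2.2.2.2.1 st.2.2.2.2.2.2) st.2.2.1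

-- ===== PRECONDITION & SPEC =====
def Spec_numOfSubsequences (s : String) (out : Int) : Prop := out = numOfSubsequences_alt s
instance (s : String) (out : Int) : Decidable (Spec_numOfSubsequences s out) := by unfold Spec_numOfSubsequences; infer_instance

-- ===== CLAIM (what is proved, stated in full; the proofs are below) =====
def Claim_equal_numOfSubsequences : Prop := ∀ (s : String), Dom_numOfSubsequences s → Spec_numOfSubsequences s (numOfSubsequences s)

-- ===== LEMMAS AND PROOFS =====

-- counts and pair/triple counts of the relevant letters, right-recursive
def cL : List Char → Int
  | [] => 0
  | c :: r => (if c = 'L' then 1 else 0) + cL r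

def cC : List Char → Int
  | [] => 0
  | c :: r => (if c = 'C' then 1 else 0) + cC r

def cT : List Char → Int
  | [] => 0
  | c :: r => (if c = 'T' then 1 else 0) + cT r

def sCT : List Char → Int
  | [] => 0
  | c :: r => (if c = 'C' then cT r else 0) + sCT r

def sLC : List Char → Int
  | [] => 0
  | c :: r => (if c = 'L' then cC r else 0) + sLC r

def sLCT : List Char → Int
  | [] => 0
  | c :: r => (if c = 'L' then sCT r else 0) + sLCT r

-- prefix-L list with offset a (prefix_l of A's first loop)
def prefL (a : Int) : List Char → List Int
  | [] => []
  | c :: r => (if c = 'L' then a + 1 else a) :: prefL (if c = 'L' then a + 1 else a) r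

-- A-style gain: max over ALL positions i of prefix_l[i] * (#T from i on), offset a, empty = 0
def gA (a : Int) : List Char → Int
  | [] => 0
  | c :: r =>
    let a' := if c = 'L' then a + 1 else a
    max (a' * cT (c :: r)) (gA a' r)

-- B-style gain: same but only at 'L' positions
def gB (a : Int) : List Char → Int
  | [] => 0
  | c :: r => if c = 'L' then max ((a + 1) * cT r) (gB (a + 1) r) else gB a r

theorem aLoop1_eq (xs : List Char) : ∀ (l lc lct : Int) (pre : List Int),
    aLoop1 xs l lc lct pre =
      (l + cL xs, lc + l * cC xs + sLC xs,
        lct + lc * cT xs + l * sCT xs + sLCT xs, pre ++ prefL l xs) := by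
  induction xs with
  | nil => intro l lc lct pre; simp [aLoop1, cL, cC, cT, sLC, sCT, sLCT, prefL]
  | cons c r ih =>
    intro l lc lct pre
    by_cases hL : c = 'L' <;> by_cases hC : c = 'C' <;> by_cases hT : c = 'T' <;>
      simp [aLoop1, cL, cC, cT, sLC, sCT, sLCT, prefL, hL, hC, hT, ih] <;>
      and_intros <;> ring

theorem aLoop2_append (e : Char × Int) (l : List (Char × Int)) : ∀ (t ct mg : Int),
    aLoop2 (l ++ [e]) t ct mg =
      aLoop2 [e] (aLoop2 l t ct mg).1 (aLoop2 l t ct mg).2.1 (aLoop2 l t ct mg).2.2 := by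
  induction l with
  | nil => intro t ct mg; rfl
  | cons p r ih => intro t ct mg; obtain ⟨c, v⟩ := p; simp [aLoop2, ih]

theorem aLoop2_eq (xs : List Char) : ∀ (a : Int),
    aLoop2 ((xs.zip (prefL a xs)).reverse) 0 0 0 = (cT xs, sCT xs, gA a xs) := by
  induction xs with
  | nil => intro a; simp [aLoop2, cT, sCT, gA, prefL]
  | cons c r ih =>
    intro a
    have hrev : ((c :: r).zip (prefL a (c :: r))).reverse =
        (r.zip (prefL (if c = 'L' then a + 1 else a) r)).reverse ++
          [(c, if c = 'L' then a + 1 else a)] := by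
      simp [prefL, List.zip]
    rw [hrev, aLoop2_append, ih]
    by_cases hT : c = 'T' <;> by_cases hC : c = 'C' <;>
      simp [aLoop2, cT, sCT, gA, hT, hC, max_comm] <;> and_intros <;> ring_nf

theorem bLoop_eq (xs : List Char) : ∀ (tt l c lc lct ct ts mg : Int), 0 ≤ mg →
    tt = ts + cT xs →
    bLoop tt xs l c lc lct ct ts mg =
      (l + cL xs, c + cC xs, lc + l * cC xs + sLC xs,
        lct + lc * cT xs + l * sCT xs + sLCT xs,
        ct + sCT xs + c * cT xs, ts + cT xs, max mg (gB l xs)) := by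
  induction xs with
  | nil =>
    intro tt l c lc lct ct ts mg h0 htt
    simp [bLoop, cL, cC, cT, sLC, sCT, sLCT, gB]
    omega
  | cons ch r ih =>
    intro tt l c lc lct ct ts mg h0 htt
    by_cases hL : ch = 'L'
    · have hcT : cT (ch :: r) = cT r := by simp [cT, hL]
      have hdiff : tt - ts = cT r := by rw [htt, hcT]; ring
      have hmax : (if (l + 1) * (tt - ts) > mg then (l + 1) * (tt - ts) else mg)
          = max mg ((l + 1) * cT r) := by
        rw [hdiff]; split <;> omega
      have h2 := ih tt (l + 1) c lc lct ct ts (max mg ((l + 1) * cT r))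
        (le_trans h0 (le_max_left _ _)) (by rw [htt, hcT])
      simp only [bLoop, hL]
      rw [hmax, h2]
      simp [cL, cC, cT, sLC, sCT, sLCT, gB]
      and_intros <;> ring
    · by_cases hC : ch = 'C'
      · have hcT : cT (ch :: r) = cT r := by simp [cT, hC]
        have h2 := ih tt l (c + 1) (lc + l) lct ct ts mg h0 (by rw [htt, hcT])
        simp only [bLoop, hC]
        rw [h2]
        simp [cL, cC, cT, sLC, sCT, sLCT, gB]
        and_intros <;> ring
      · by_cases hT : ch = 'T'
        · have hcT : cT (ch :: r) = 1 + cT r := by simp [cT, hT]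
          have h2 := ih tt l c lc (lct + lc) (ct + c) (ts + 1) mg h0
            (by rw [htt, hcT]; ring)
          simp only [bLoop, hT]
          rw [h2]
          simp [cL, cC, cT, sLC, sCT, sLCT, gB]
          and_intros <;> ring
        · have hcT : cT (ch :: r) = cT r := by simp [cT, hT]
          have h2 := ih tt l c lc lct ct ts mg h0 (by rw [htt, hcT])
          simp only [bLoop, if_neg hL, if_neg hC, if_neg hT]
          rw [h2]
          simp [cL, cC, cT, sLC, sCT, sLCT, gB, hL, hC, hT]

theorem gA_nonneg (xs : List Char) : ∀ a : Int, 0 ≤ gA a xs := by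
  induction xs with
  | nil => intro a; simp [gA]
  | cons c r ih => intro a; simp only [gA]; exact le_max_of_le_right (ih _)
theorem gB_nonneg (xs : List Char) : ∀ a : Int, 0 ≤ gB a xs := by
  induction xs with
  | nil => intro a; simp [gB]
  | cons c r ih =>
    intro a
    by_cases h : c = 'L' <;> simp only [gB, h, if_true, if_false]
    · exact le_max_of_le_right (ih _)
    · exact ih _
theorem cT_nonneg (xs : List Char) : 0 ≤ cT xs := by
  induction xs with
  | nil => simp [cT]
  | cons c r ih => simp only [cT]; split <;> omega

theorem max_cong_of_le (c C u v : Int) (hcC : c ≤ C) (h : max c u = max c v) :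
    max C u = max C v := by omega

theorem g_bridge (xs : List Char) : ∀ a : Int, 0 ≤ a →
    max (a * cT xs) (gB a xs) = max (a * cT xs) (gA a xs) := by
  induction xs with
  | nil => intro a _; simp [gA, gB]
  | cons c r ih =>
    intro a ha
    by_cases hL : c = 'L'
    · subst hL
      have hcT : cT ('L' :: r) = cT r := by simp [cT]
      have hle : a * cT r ≤ (a + 1) * cT r :=
        mul_le_mul_of_nonneg_right (by linarith) (cT_nonneg r)
      simp only [gA, gB, hcT, reduceIte]
      rw [max_eq_right (le_trans hle (le_max_left _ _)),
        max_eq_right (le_trans hle (le_max_left _ _))]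
      exact ih (a + 1) (by linarith)
    · have hle : cT r ≤ cT (c :: r) := by simp only [cT]; split <;> omega
      have hle' : a * cT r ≤ a * cT (c :: r) := mul_le_mul_of_nonneg_left hle ha
      simp only [gA, gB, hL, if_false]
      have h := max_cong_of_le _ _ _ _ hle' (ih a ha)
      generalize hx : a * cT (c :: r) = C at h ⊢
      generalize hy : gB a r = u at h ⊢
      generalize hz : gA a r = v at h ⊢
      omega

theorem goT (l : List Char) : ∀ (fuel acc : Nat), l.length ≤ fuel →
    PySem.Chars.count.go ['T'] fuel l acc = acc + l.count 'T' := by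
  induction l with
  | nil => intro fuel acc _; cases fuel <;> simp [PySem.Chars.count.go]
  | cons h t ih =>
    intro fuel acc hf
    cases fuel with
    | zero => simp at hf
    | succ f =>
      have hf' : t.length ≤ f := by
        simp only [List.length_cons] at hf; omega
      by_cases hh : h = 'T'
      · simp [PySem.Chars.count.go, List.isPrefixOf, hh, ih f (acc + 1) hf']
        omega
      · simp [PySem.Chars.count.go, List.isPrefixOf, hh, ih f acc hf']
        exact fun e => absurd e.symm hh

theorem cT_eq_count (xs : List Char) : cT xs = (xs.count 'T' : Int) := by
  induction xs with
  | nil => simp [cT]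
  | cons c r ih =>
    by_cases h : c = 'T'
    · simp [cT, h, ih]; omega
    · simp [cT, h, ih]

theorem chars_countT (l : List Char) : PySem.Chars.count l ['T'] = l.count 'T' := by
  simp [PySem.Chars.count]
  rw [goT l l.length 0 le_rfl]
  omega

theorem countT_eq (s : String) : (PySem.Str.count s "T" : Int) = cT s.toList := by
  simp [PySem.Str.count, chars_countT, cT_eq_count]

-- ===== VERDICT (by name: the statement is the Claim_ definition above) =====
theorem gB_eq_gA (xs : List Char) : gB 0 xs = gA 0 xs := by
  have h := g_bridge xs 0 le_rfl
  simpa [max_eq_right (gB_nonneg xs 0), max_eq_right (gA_nonneg xs 0)] using h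

theorem numOfSubsequences_spec : Claim_equal_numOfSubsequences := by
  intro s _
  show numOfSubsequences s = numOfSubsequences_alt s
  unfold numOfSubsequences numOfSubsequences_alt
  simp only []
  rw [aLoop1_eq, countT_eq]
  simp only [List.nil_append]
  rw [aLoop2_eq s.toList 0]
  rw [bLoop_eq s.toList (cT s.toList) 0 0 0 0 0 0 0 le_rfl (by ring)]
  simp [gB_eq_gA]
  have := gA_nonneg s.toList 0
  omega
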